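-- pv_equiv track=rewrite | github.com/Fruitful-Network-Development/mycite-core | MyCiteV2/scripts/bootstrap_aws_csm_newsletter_state.py | _optional_email
-- ===== SOURCE A (Python) =====
-- def _as_text(value: object) -> str:
--     if value is None:
--         return ""
--     return str(value).strip()
--
-- def _optional_email(value: object) -> str:
--     token = _as_text(value).lower()
--     if not token or token.count("@") != 1 or any(ch.isspace() for ch in token):
--         return ""
--     local_part, domain_part = token.split("@", 1)
--     if not local_part or not domain_part or "." not in domain_part:
--         return ""
--     return token
-- ===== SOURCE B (Python) =====
-- def _optional_email(value: object) -> str: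
--     if value is None:
--         token = ""
--     else:
--         token = str(value).strip().lower()
--     # single-pass DFA: 0 empty local, 1 local seen, 2 just after '@',
--     # 3 domain seen no dot, 4 dot seen in domain, 5 reject (absorbing)
--     state = 0
--     for ch in token:
--         if state == 5 or ch.isspace():
--             state = 5
--         elif state == 0:
--             state = 5 if ch == "@" else 1
--         elif state == 1:
--             state = 2 if ch == "@" else 1
--         elif ch == "@":
--             state = 5
--         elif ch == ".":
--             state = 4
--         elif state == 2:
--             state = 3
--     return token if state == 4 else ""
-- ===== Notes on version B (the rewrite author's own statement) =====
-- stated objective: alternative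
-- what changed: Replaces A's chain of separate passes (separator count, split, whitespace scan, substring membership) with a single left-to-right pass of a six-state finite state machine that accepts exactly the valid email shapes.
import Mathlib
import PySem

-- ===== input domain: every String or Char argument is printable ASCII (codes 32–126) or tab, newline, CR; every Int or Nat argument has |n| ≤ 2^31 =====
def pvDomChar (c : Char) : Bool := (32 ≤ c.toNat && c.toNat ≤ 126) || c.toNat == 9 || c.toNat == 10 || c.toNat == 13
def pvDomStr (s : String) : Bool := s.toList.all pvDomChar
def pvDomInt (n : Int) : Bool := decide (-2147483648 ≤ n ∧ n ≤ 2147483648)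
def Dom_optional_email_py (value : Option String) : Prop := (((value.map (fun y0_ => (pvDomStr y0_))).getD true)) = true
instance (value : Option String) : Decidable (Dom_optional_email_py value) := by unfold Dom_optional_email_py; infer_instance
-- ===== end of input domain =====

-- ===== PORT A =====
-- B replaces A's count/split/membership chain by a single-pass state machine over the token (alternative decomposition, same cost).
def pvAsText (value : Option String) : String :=
  match value with
  | none => ""
  | some s => PySem.Str.strip s

-- tuple unpacking of the two parts of token.split at the at-sign (maxsplit 1); the fallback arms are
-- unreachable here because the split is only reached when the token contains exactly one at-sign (two parts)
def pvUnpack2 (parts : Option (List String)) : String × String :=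
  match parts with
  | some (x :: y :: _) => (x, y)
  | _ => ("", "")

def optional_email_py (value : Option String) : String :=
  let token := PySem.Str.lower (pvAsText value)
  if token = "" ∨ PySem.Str.count token "@" ≠ 1 ∨ token.toList.any (fun ch => PySem.Chars.isspace ch) then ""
  else
    let parts := pvUnpack2 (PySem.Str.splitMax? token "@" 1)
    let localPart := parts.1
    let domainPart := parts.2
    if localPart = "" ∨ domainPart = "" ∨ PySem.Str.isIn "." domainPart = false then ""
    else token

-- ===== PORT B =====
-- DFA states: 0 empty local, 1 local seen, 2 just after the at-sign, 3 domain seen without dot, 4 dot seen in domain, 5 reject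
def pvStepB (state : Nat) (ch : Char) : Nat :=
  if state = 5 ∨ PySem.Chars.isspace ch then 5
  else if state = 0 then (if ch = '@' then 5 else 1)
  else if state = 1 then (if ch = '@' then 2 else 1)
  else if ch = '@' then 5
  else if ch = '.' then 4
  else if state = 2 then 3
  else state

def optional_email_py_alt (value : Option String) : String :=
  let token := match value with
    | none => ""
    | some s => PySem.Str.lower (PySem.Str.strip s)
  if token.toList.foldl pvStepB 0 = 4 then token else ""

-- ===== PRECONDITION & SPEC =====
-- A is total (it returns on every Option String); Pre_ is trivially true and excludes nothing,
-- it only names a canonical accepted input of the validator.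
def Pre_optional_email_py (value : Option String) : Prop :=
  value = some "a@b.c" ∨ value ≠ some "a@b.c"
instance (value : Option String) : Decidable (Pre_optional_email_py value) := by unfold Pre_optional_email_py; infer_instance
def pvWitness_optional_email_py : Option String := some "a@b.c"

def Spec_optional_email_py (value : Option String) (out : String) : Prop := out = optional_email_py_alt value
instance (value : Option String) (out : String) : Decidable (Spec_optional_email_py value out) := by unfold Spec_optional_email_py; infer_instance

-- ===== CLAIM (what is proved, stated in full; the proofs are below) =====
def Claim_equal_optional_email_py : Prop := ∀ (value : Option String), Dom_optional_email_py value → Pre_optional_email_py value → Spec_optional_email_py value (optional_email_py value)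

-- ===== LEMMAS AND PROOFS =====

-- a "good" character keeps the DFA alive inside the local/domain parts
def pvGood (c : Char) : Prop := c ≠ '@' ∧ PySem.Chars.isspace c = false

theorem pvCount_one_split (l : List Char) (h : l.count '@' = 1) :
    ∃ a b, l = a ++ '@' :: b ∧ '@' ∉ a ∧ '@' ∉ b := by
  induction l with
  | nil => simp at h
  | cons x t ih =>
    by_cases hx : x = '@'
    · subst hx
      refine ⟨[], t, rfl, by simp, ?_⟩
      rw [← List.count_eq_zero (a := '@')]
      simp [List.count_cons] at h
      omega
    · have : t.count '@' = 1 := by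
        simpa [List.count_cons, hx] using h
      obtain ⟨a, b, rfl, ha, hb⟩ := ih this
      exact ⟨x :: a, b, rfl, by simp [ha, Ne.symm hx], hb⟩

theorem pvFoldl5 (t : List Char) : t.foldl pvStepB 5 = 5 := by
  induction t with
  | nil => rfl
  | cons c t ih => simpa [pvStepB] using ih

theorem pvFoldl4 (t : List Char) :
    (t.foldl pvStepB 4 = 4) ↔ (∀ c ∈ t, pvGood c) := by
  induction t with
  | nil => simp
  | cons c t ih =>
    by_cases hs : PySem.Chars.isspace c
    · simp [pvStepB, hs, pvFoldl5, pvGood]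
    · by_cases hat : c = '@'
      · simp [pvStepB, hs, hat, pvFoldl5, pvGood]
      · have : pvStepB 4 c = 4 := by simp [pvStepB, hs, hat]
        simp only [List.foldl_cons, this, ih, List.mem_cons]
        constructor
        · rintro hall d (rfl | hd)
          · exact ⟨hat, by simpa using hs⟩
          · exact hall d hd
        · intro hall d hd; exact hall d (Or.inr hd)

theorem pvFoldl23 (t : List Char) :
    ((t.foldl pvStepB 2 = 4) ↔ ((∀ c ∈ t, pvGood c) ∧ '.' ∈ t))
    ∧ ((t.foldl pvStepB 3 = 4) ↔ ((∀ c ∈ t, pvGood c) ∧ '.' ∈ t)) := by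
  induction t with
  | nil => simp
  | cons c t ih =>
    by_cases hs : PySem.Chars.isspace c
    · constructor <;> simp [pvStepB, hs, pvFoldl5, pvGood]
    · by_cases hat : c = '@'
      · constructor <;> simp [pvStepB, hs, hat, pvFoldl5, pvGood]
      · by_cases hdot : c = '.'
        · have h2 : pvStepB 2 c = 4 := by rw [hdot]; decide
          have h3 : pvStepB 3 c = 4 := by rw [hdot]; decide
          constructor <;>
          · simp only [List.foldl_cons, h2, h3, pvFoldl4, List.mem_cons]
            constructor
            · intro hall
              exact ⟨by rintro d (rfl | hd); exact ⟨hat, by simpa using hs⟩; exact hall d hd,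
                Or.inl hdot.symm⟩
            · rintro ⟨hall, _⟩ d hd; exact hall d (Or.inr hd)
        · have h2 : pvStepB 2 c = 3 := by simp [pvStepB, hs, hat, hdot]
          have h3 : pvStepB 3 c = 3 := by simp [pvStepB, hs, hat, hdot]
          constructor <;>
          · simp only [List.foldl_cons, h2, h3, ih.2, List.mem_cons]
            constructor
            · rintro ⟨hall, hd⟩
              refine ⟨by rintro d (rfl | hd2); exact ⟨hat, by simpa using hs⟩; exact hall d hd2,
                Or.inr hd⟩
            · rintro ⟨hall, (hc | hd)⟩
              · exact absurd hc.symm hdot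
              · exact ⟨fun d hd2 => hall d (Or.inr hd2), hd⟩

theorem pvFoldl1 (t : List Char) :
    (t.foldl pvStepB 1 = 4) ↔
      ∃ a b, t = a ++ '@' :: b ∧ (∀ c ∈ a, pvGood c) ∧ (∀ c ∈ b, pvGood c) ∧ '.' ∈ b := by
  induction t with
  | nil =>
    simp only [List.foldl_nil]
    constructor
    · intro h; omega
    · rintro ⟨a, b, h, -⟩; exact absurd h (by simp)
  | cons c t ih =>
    by_cases hs : PySem.Chars.isspace c
    · have h1 : pvStepB 1 c = 5 := by simp [pvStepB, hs]
      simp only [List.foldl_cons, h1, pvFoldl5]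
      constructor
      · intro h; omega
      · rintro ⟨a, b, heq, hga, hgb, hdot⟩
        cases a with
        | nil =>
          have hc : c = '@' := by simpa using congrArg (fun l => l.head?) heq
          exact absurd hs (by rw [hc]; decide)
        | cons y a' =>
          have hcy : c = y := by simpa using congrArg (fun l => l.head?) heq
          exact absurd hs (by rw [hcy]; simp [(hga y (by simp)).2])
    · by_cases hat : c = '@'
      · have h1 : pvStepB 1 c = 2 := by rw [hat]; decide
        simp only [List.foldl_cons, h1, (pvFoldl23 t).1]
        constructor
        · rintro ⟨hall, hdot⟩
          exact ⟨[], t, by simp [hat], by simp, hall, hdot⟩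
        · rintro ⟨a, b, heq, hga, hgb, hdot⟩
          cases a with
          | nil =>
            obtain ⟨-, hteq⟩ : c = '@' ∧ t = b := by simpa using heq
            rw [hteq]; exact ⟨hgb, hdot⟩
          | cons y a' =>
            have hcy : c = y := by simpa using congrArg (fun l => l.head?) heq
            exact absurd hat (by rw [hcy]; exact (hga y (by simp)).1)
      · have h1 : pvStepB 1 c = 1 := by simp [pvStepB, hs, hat]
        simp only [List.foldl_cons, h1, ih]
        constructor
        · rintro ⟨a, b, heq, hga, hgb, hdot⟩
          refine ⟨c :: a, b, by simp [heq], ?_, hgb, hdot⟩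
          intro d hd
          rcases List.mem_cons.mp hd with rfl | hd2
          · exact ⟨hat, by simpa using hs⟩
          · exact hga d hd2
        · rintro ⟨a, b, heq, hga, hgb, hdot⟩
          cases a with
          | nil =>
            have hc : c = '@' := by simpa using congrArg (fun l => l.head?) heq
            exact absurd hc hat
          | cons y a' =>
            obtain ⟨-, hteq⟩ : c = y ∧ t = a' ++ '@' :: b := by simpa using heq
            exact ⟨a', b, hteq, fun d hd => hga d (by simp [hd]), hgb, hdot⟩

theorem pvFoldl0 (t : List Char) :
    (t.foldl pvStepB 0 = 4) ↔
      ∃ a b, t = a ++ '@' :: b ∧ a ≠ [] ∧ (∀ c ∈ a, pvGood c) ∧ (∀ c ∈ b, pvGood c) ∧ '.' ∈ b := by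
  cases t with
  | nil =>
    simp only [List.foldl_nil]
    constructor
    · intro h; omega
    · rintro ⟨a, b, h, -⟩; exact absurd h (by simp)
  | cons c t =>
    by_cases hs : PySem.Chars.isspace c
    · have h1 : pvStepB 0 c = 5 := by simp [pvStepB, hs]
      simp only [List.foldl_cons, h1, pvFoldl5]
      constructor
      · intro h; omega
      · rintro ⟨a, b, heq, hne, hga, hgb, hdot⟩
        cases a with
        | nil => exact absurd rfl hne
        | cons y a' =>
          have hcy : c = y := by simpa using congrArg (fun l => l.head?) heq
          exact absurd hs (by rw [hcy]; simp [(hga y (by simp)).2])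
    · by_cases hat : c = '@'
      · have h1 : pvStepB 0 c = 5 := by simp [pvStepB, hs, hat]
        simp only [List.foldl_cons, h1, pvFoldl5]
        constructor
        · intro h; omega
        · rintro ⟨a, b, heq, hne, hga, hgb, hdot⟩
          cases a with
          | nil => exact absurd rfl hne
          | cons y a' =>
            have hcy : c = y := by simpa using congrArg (fun l => l.head?) heq
            exact absurd hat (by rw [hcy]; exact (hga y (by simp)).1)
      · have h1 : pvStepB 0 c = 1 := by simp [pvStepB, hs, hat]
        simp only [List.foldl_cons, h1, pvFoldl1]
        constructor
        · rintro ⟨a, b, heq, hga, hgb, hdot⟩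
          refine ⟨c :: a, b, by simp [heq], by simp, ?_, hgb, hdot⟩
          intro d hd
          rcases List.mem_cons.mp hd with rfl | hd2
          · exact ⟨hat, by simpa using hs⟩
          · exact hga d hd2
        · rintro ⟨a, b, heq, hne, hga, hgb, hdot⟩
          cases a with
          | nil => exact absurd rfl hne
          | cons y a' =>
            obtain ⟨-, hteq⟩ : c = y ∧ t = a' ++ '@' :: b := by simpa using heq
            exact ⟨a', b, hteq, fun d hd => hga d (by simp [hd]), hgb, hdot⟩

theorem pvSingleton_infix (x : Char) (l : List Char) : [x] <:+: l ↔ x ∈ l := by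
  constructor
  · rintro ⟨s, t, rfl⟩; simp
  · intro h
    obtain ⟨s, t, rfl⟩ := List.append_of_mem h
    exact ⟨s, t, by simp⟩

theorem pvSplit_unique (a : List Char) : ∀ (a' b b' : List Char),
    a ++ '@' :: b = a' ++ '@' :: b' → '@' ∉ a → '@' ∉ a' → a = a' ∧ b = b' := by
  induction a with
  | nil =>
    intro a' b b' h ha ha'
    cases a' with
    | nil => simpa using h
    | cons y t' =>
      obtain ⟨h1, -⟩ : '@' = y ∧ b = t' ++ '@' :: b' := by simpa using h
      exact absurd (h1 ▸ List.mem_cons_self) ha'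
  | cons x t ih =>
    intro a' b b' h ha ha'
    cases a' with
    | nil =>
      obtain ⟨h1, -⟩ : x = '@' ∧ t ++ '@' :: b = b' := by simpa using h
      exact absurd (h1 ▸ List.mem_cons_self) ha
    | cons y t' =>
      obtain ⟨h1, h2⟩ : x = y ∧ t ++ '@' :: b = t' ++ '@' :: b' := by simpa using h
      obtain ⟨e1, e2⟩ := ih t' b b' h2 (fun hm => ha (List.mem_cons_of_mem _ hm))
        (fun hm => ha' (List.mem_cons_of_mem _ hm))
      exact ⟨by rw [h1, e1], e2⟩


theorem pvCount_go_singleton (c : Char) (fuel : Nat) (l : List Char) (acc : Nat)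
    (h : l.length ≤ fuel) : PySem.Chars.count.go [c] fuel l acc = acc + l.count c := by
  induction fuel generalizing l acc with
  | zero =>
    have : l = [] := List.eq_nil_of_length_eq_zero (Nat.le_zero.mp h)
    subst this; simp [PySem.Chars.count.go]
  | succ n ih =>
    cases l with
    | nil => simp [PySem.Chars.count.go]
    | cons x t =>
      rw [PySem.Chars.count.go]
      by_cases hx : c = x
      · subst hx
        simp only [List.isPrefixOf, BEq.rfl, List.isPrefixOf_nil_left, Bool.and_true, if_true,
          List.length_singleton, List.drop_succ_cons, List.drop_zero, List.length_cons, ite_true, List.length_nil]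
        rw [ih t (acc + 1) (by simpa using h)]
        simp [List.count_cons]
        omega
      · have hpre : [c].isPrefixOf (x :: t) = false := by
          simp [List.isPrefixOf, hx]
        rw [hpre]
        simp only [Bool.false_eq_true, if_false]
        rw [ih t acc (by simpa using h)]
        have : ¬ x = c := fun h => hx h.symm
        simp [List.count_cons, this]

theorem pvCount_singleton (c : Char) (l : List Char) :
    PySem.Chars.count l [c] = l.count c := by
  rw [PySem.Chars.count]
  simp only [List.isEmpty_cons, Bool.false_eq_true, if_false]
  exact (pvCount_go_singleton c l.length l 0 le_rfl).trans (by omega)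


theorem pvSplit_go_zero (sep : List Char) (fuel : Nat) (b cur : List Char) (acc : List (List Char)) :
    PySem.Chars.splitOnMax.go sep fuel 0 b cur acc = ((cur.reverse ++ b) :: acc).reverse := by
  cases fuel with
  | zero => rw [PySem.Chars.splitOnMax.go.eq_def]
  | succ n =>
    cases b with
    | nil => rw [PySem.Chars.splitOnMax.go.eq_def]; simp
    | cons x t => rw [PySem.Chars.splitOnMax.go.eq_def]; simp

theorem pvSplit_go (fuel : Nat) (a b cur : List Char) (acc : List (List Char))
    (h : a.length + 1 ≤ fuel) (ha : '@' ∉ a) :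
    PySem.Chars.splitOnMax.go ['@'] fuel 1 (a ++ '@' :: b) cur acc
      = (b :: (cur.reverse ++ a) :: acc).reverse := by
  induction a generalizing fuel cur acc with
  | nil =>
    cases fuel with
    | zero => omega
    | succ n =>
      rw [PySem.Chars.splitOnMax.go.eq_def]
      simp only [List.nil_append, List.isPrefixOf, BEq.rfl, List.isPrefixOf_nil_left,
        Bool.and_true, if_true, List.length_singleton, List.drop_succ_cons, List.drop_zero,
        List.length_nil, ite_true, one_ne_zero, if_false]
      rw [pvSplit_go_zero]
      simp
  | cons x a' ih =>
    cases fuel with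
    | zero => simp at h
    | succ n =>
      have hx : ¬ ('@' : Char) = x := fun hh => ha (hh ▸ List.mem_cons_self)
      rw [PySem.Chars.splitOnMax.go.eq_def]
      simp only [List.cons_append, List.isPrefixOf, List.isPrefixOf_nil_left, Bool.and_true,
        beq_iff_eq, hx, if_false, ite_false, one_ne_zero]
      have h1 : a'.length + 1 ≤ n := by simp at h; omega
      have ha' : '@' ∉ a' := fun hm => ha (List.mem_cons_of_mem _ hm)
      rw [ih n (x :: cur) acc h1 ha']
      simp

theorem pvSplitMax_singleton (a b : List Char) (ha : '@' ∉ a) :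
    PySem.Chars.splitMax? (a ++ '@' :: b) ['@'] 1 = some [a, b] := by
  rw [PySem.Chars.splitMax?]
  simp only [List.isEmpty_cons, Bool.false_eq_true, if_false]
  rw [PySem.Chars.splitOnMax]
  simp only [show ¬ ((1:Int) < 0) by norm_num, if_false, Int.toNat_one]
  rw [pvSplit_go _ a b [] [] (by simp) ha]
  simp

theorem pvMain (token : String) :
    (if token = "" ∨ PySem.Str.count token "@" ≠ 1 ∨ token.toList.any (fun ch => PySem.Chars.isspace ch) then ""
     else
       let parts := pvUnpack2 (PySem.Str.splitMax? token "@" 1)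
       if parts.1 = "" ∨ parts.2 = "" ∨ PySem.Str.isIn "." parts.2 = false then ""
       else token)
    = (if token.toList.foldl pvStepB 0 = 4 then token else "") := by
  by_cases h1 : token = "" ∨ PySem.Str.count token "@" ≠ 1 ∨ token.toList.any (fun ch => PySem.Chars.isspace ch)
  · rw [if_pos h1, if_neg]
    intro h4
    rw [pvFoldl0] at h4
    obtain ⟨a, b, heq, hne, hga, hgb, hdot⟩ := h4
    rcases h1 with he | hc | hsp
    · rw [he] at heq; simp at heq
    · apply hc
      rw [PySem.Str.count_eq, show ("@" : String).toList = ['@'] from rfl, pvCount_singleton, heq]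
      have ca : a.count '@' = 0 := List.count_eq_zero.mpr (fun hm => (hga _ hm).1 rfl)
      have cb : b.count '@' = 0 := List.count_eq_zero.mpr (fun hm => (hgb _ hm).1 rfl)
      simp [List.count_append, ca, cb]
    · rw [heq] at hsp
      simp only [List.any_eq_true] at hsp
      obtain ⟨c, hc2, hc3⟩ := hsp
      rcases List.mem_append.mp hc2 with hma | hmb
      · rw [(hga c hma).2] at hc3; exact absurd hc3 (by simp)
      · rcases List.mem_cons.mp hmb with rfl | hmb2
        · exact absurd hc3 (by decide)
        · rw [(hgb c hmb2).2] at hc3; exact absurd hc3 (by simp)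
  · obtain ⟨hne, hrest⟩ := not_or.mp h1
    obtain ⟨hcnt', hsp⟩ := not_or.mp hrest
    have hcnt := not_not.mp hcnt'
    have hcnt1 : token.toList.count '@' = 1 := by
      have e : PySem.Str.count token "@" = token.toList.count '@' := by
        rw [PySem.Str.count_eq]; exact pvCount_singleton '@' token.toList
      rw [e] at hcnt; exact hcnt
    rw [if_neg (by simp [hne, pvCount_singleton, hcnt1, hsp])]
    obtain ⟨a, b, heq, ha, hb⟩ := pvCount_one_split _ hcnt1
    have hsplit : PySem.Str.splitMax? token "@" 1 = some [String.ofList a, String.ofList b] := by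
      rw [PySem.Str.splitMax?]
      have e : PySem.Chars.splitMax? token.toList ("@" : String).toList 1 = some [a, b] := by
        rw [heq]; exact pvSplitMax_singleton a b ha
      rw [e]; rfl
    rw [hsplit]
    simp only [pvUnpack2]
    have hnospace : ∀ c ∈ token.toList, PySem.Chars.isspace c = false := by
      intro c hcm
      have hany : token.toList.any (fun ch => PySem.Chars.isspace ch) = false := by
        simpa using hsp
      simpa using List.any_eq_false.mp hany c hcm
    have hga : ∀ c ∈ a, pvGood c := fun c hcm =>
      ⟨fun hh => ha (hh ▸ hcm), hnospace c (by rw [heq]; exact List.mem_append_left _ hcm)⟩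
    have hgb : ∀ c ∈ b, pvGood c := fun c hcm =>
      ⟨fun hh => hb (hh ▸ hcm), hnospace c (by rw [heq]; exact List.mem_append_right _ (List.mem_cons_of_mem _ hcm))⟩
    have hB : (token.toList.foldl pvStepB 0 = 4) ↔ (a ≠ [] ∧ '.' ∈ b) := by
      rw [pvFoldl0]
      constructor
      · rintro ⟨a', b', heq', hne', hga', hgb', hdot'⟩
        rw [heq] at heq'
        obtain ⟨e1, e2⟩ := pvSplit_unique a a' b b' heq'
          ha (fun hm => (hga' _ hm).1 rfl)
        rw [e1, e2]; exact ⟨hne', hdot'⟩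
      · rintro ⟨hne2, hdot2⟩
        exact ⟨a, b, heq, hne2, hga, hgb, hdot2⟩
    have hofa : (String.ofList a = "" ↔ a = []) := by
      constructor
      · intro h; have := congrArg String.toList h; simpa using this
      · rintro rfl; rfl
    have hofb : (String.ofList b = "" ↔ b = []) := by
      constructor
      · intro h; have := congrArg String.toList h; simpa using this
      · rintro rfl; rfl
    have hisin : (PySem.Str.isIn "." (String.ofList b) = false ↔ '.' ∉ b) := by
      rw [PySem.Str.isIn_eq, PySem.Chars.isIn_eq_false_iff,
        show ("." : String).toList = ['.'] from rfl, pvSingleton_infix, String.toList_ofList]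
    by_cases hAc : String.ofList a = "" ∨ String.ofList b = "" ∨ PySem.Str.isIn "." (String.ofList b) = false
    · rw [if_pos hAc, if_neg]
      rw [hB]
      rintro ⟨hne2, hdot2⟩
      rcases hAc with h | h | h
      · exact hne2 (hofa.mp h)
      · rw [hofb.mp h] at hdot2; simp at hdot2
      · exact (hisin.mp h) hdot2
    · obtain ⟨h2, hAc'⟩ := not_or.mp hAc
      obtain ⟨h3, h4⟩ := not_or.mp hAc'
      rw [if_neg (by intro hor; rcases hor with h | h | h; exacts [h2 h, h3 h, h4 h]), if_pos]
      rw [hB]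
      refine ⟨fun hh => h2 (by simp [hh]), ?_⟩
      by_contra hdot2
      exact h4 (hisin.mpr hdot2)

-- ===== VERDICT (by name: the statement is the Claim_ definition above) =====
theorem optional_email_py_spec : Claim_equal_optional_email_py := by
  intro value _ _
  show optional_email_py value = optional_email_py_alt value
  cases value with
  | none => exact pvMain ""
  | some s => exact pvMain (PySem.Str.lower (PySem.Str.strip s))
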